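-- pv_equiv track=rewrite | github.com/JMocklerUMD/2025_Hypersonic_BL_ID | spurious_class_filtering_dev.py | filter_by_simple_threshold
-- ===== SOURCE A (Python) =====
-- def filter_by_simple_threshold(Imagelist, confidence, WP_io, confid_thres):
--     n00, n01, n10, n11 = 0, 0, 0, 0
--     filtered_result = []
--     for j, _ in enumerate(Imagelist):
--         if (confidence[j] > confid_thres):
--             filtered_result.append(1)
--         else:
--             filtered_result.append(0)
--
--         # Get stats on the current image
--         if WP_io[j] == 0:
--             if filtered_result[j] == 0:
--                 n00 += 1
--             if filtered_result[j] == 1: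
--                 n01 += 1
--         elif WP_io[j] == 1:
--             if filtered_result[j] == 0:
--                 n10 += 1
--             if filtered_result[j] == 1:
--                 n11 += 1
--
--     return filtered_result, n00, n01, n10, n11
-- ===== SOURCE B (Python) =====
-- def filter_by_simple_threshold(Imagelist, confidence, WP_io, confid_thres):
--     filtered_result = [1 if c > confid_thres else 0 for c in confidence[:len(Imagelist)]]
--     pairs = list(zip(WP_io, filtered_result))
--     c0 = sum(1 for w, _ in pairs if w == 0)
--     s0 = sum(f for w, f in pairs if w == 0)
--     c1 = sum(1 for w, _ in pairs if w == 1)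
--     s1 = sum(f for w, f in pairs if w == 1)
--     return filtered_result, c0 - s0, s0, c1 - s1, s1
-- ===== Notes on version B (the rewrite author's own statement) =====
-- stated objective: alternative
-- what changed: B is staged: it slices confidence to the image count and maps it to the 0/1 prediction list, then derives the confusion counts arithmetically from per-truth-class size and sum (n01 = sum of predictions among truth-0, n00 = class size minus that sum, likewise for truth 1), replacing A's indexed loop with four branch-updated accumulators.
import Mathlib
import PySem

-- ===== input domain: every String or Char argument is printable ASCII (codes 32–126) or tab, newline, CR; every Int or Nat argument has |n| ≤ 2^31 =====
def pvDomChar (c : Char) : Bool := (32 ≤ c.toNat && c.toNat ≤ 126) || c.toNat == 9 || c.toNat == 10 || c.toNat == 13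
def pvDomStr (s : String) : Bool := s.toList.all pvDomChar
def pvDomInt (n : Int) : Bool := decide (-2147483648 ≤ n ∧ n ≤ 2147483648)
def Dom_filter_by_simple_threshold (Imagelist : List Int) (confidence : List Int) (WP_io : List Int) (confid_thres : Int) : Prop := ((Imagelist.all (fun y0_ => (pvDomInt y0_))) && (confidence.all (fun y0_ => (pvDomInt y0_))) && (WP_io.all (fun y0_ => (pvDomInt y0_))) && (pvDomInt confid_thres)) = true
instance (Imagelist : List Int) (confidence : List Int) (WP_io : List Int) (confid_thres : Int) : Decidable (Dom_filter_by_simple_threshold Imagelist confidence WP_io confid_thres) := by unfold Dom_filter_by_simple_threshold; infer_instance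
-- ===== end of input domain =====

-- B slices/maps confidence into the prediction list and derives the confusion counts
-- arithmetically from per-class sizes and sums instead of A's four in-loop branch
-- accumulators (alternative decomposition, same cost).


-- ===== PORT A =====
-- literal transliteration of A: one loop over enumerate(Imagelist), appending to
-- filtered_result and updating the four counters through the branch structure.
def filter_by_simple_threshold (Imagelist : List Int) (confidence : List Int) (WP_io : List Int) (confid_thres : Int) : List Int × Int × Int × Int × Int :=
  (PySem.List.enumerate Imagelist 0).foldl
    (fun (st : List Int × Int × Int × Int × Int) ju =>
      let j := ju.1
      let fr := st.1 ++ [if PySem.List.pyGetD confidence j 0 > confid_thres then (1 : Int) else 0]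
      let w := PySem.List.pyGetD WP_io j 0
      let f := PySem.List.pyGetD fr j 0
      if w = 0 then
        (fr, st.2.1 + (if f = 0 then 1 else 0), st.2.2.1 + (if f = 1 then 1 else 0),
         st.2.2.2.1, st.2.2.2.2)
      else if w = 1 then
        (fr, st.2.1, st.2.2.1, st.2.2.2.1 + (if f = 0 then 1 else 0),
         st.2.2.2.2 + (if f = 1 then 1 else 0))
      else
        (fr, st.2.1, st.2.2.1, st.2.2.2.1, st.2.2.2.2))
    ([], 0, 0, 0, 0)

-- ===== PORT B =====
-- literal transliteration of B: slice+map, zip, then filtered sums and the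
-- arithmetic identities c - s and s for the four counts.
def filter_by_simple_threshold_alt (Imagelist : List Int) (confidence : List Int) (WP_io : List Int) (confid_thres : Int) : List Int × Int × Int × Int × Int :=
  let filtered_result := (PySem.List.slice confidence none (some (Imagelist.length : Int))).map
    (fun c => if c > confid_thres then (1 : Int) else 0)
  let pairs := WP_io.zip filtered_result
  let c0 := ((pairs.filter (fun p => p.1 == 0)).map (fun _ => (1 : Int))).sum
  let s0 := ((pairs.filter (fun p => p.1 == 0)).map (fun p => p.2)).sum
  let c1 := ((pairs.filter (fun p => p.1 == 1)).map (fun _ => (1 : Int))).sum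
  let s1 := ((pairs.filter (fun p => p.1 == 1)).map (fun p => p.2)).sum
  (filtered_result, c0 - s0, s0, c1 - s1, s1)

-- ===== PRECONDITION & SPEC =====
-- Pre_ excludes exactly the inputs on which A raises IndexError: confidence or WP_io
-- shorter than Imagelist.
def Pre_filter_by_simple_threshold (Imagelist : List Int) (confidence : List Int) (WP_io : List Int) (confid_thres : Int) : Prop :=
  Imagelist.length ≤ confidence.length ∧ Imagelist.length ≤ WP_io.length
instance (Imagelist : List Int) (confidence : List Int) (WP_io : List Int) (confid_thres : Int) : Decidable (Pre_filter_by_simple_threshold Imagelist confidence WP_io confid_thres) := by unfold Pre_filter_by_simple_threshold; infer_instance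

def pvWitness_filter_by_simple_threshold : List Int × List Int × List Int × Int :=
  ([7, 9], [5, 0], [1, 0], 3)

def Spec_filter_by_simple_threshold (Imagelist : List Int) (confidence : List Int) (WP_io : List Int) (confid_thres : Int) (out : List Int × Int × Int × Int × Int) : Prop := out = filter_by_simple_threshold_alt Imagelist confidence WP_io confid_thres
instance (Imagelist : List Int) (confidence : List Int) (WP_io : List Int) (confid_thres : Int) (out : List Int × Int × Int × Int × Int) : Decidable (Spec_filter_by_simple_threshold Imagelist confidence WP_io confid_thres out) := by unfold Spec_filter_by_simple_threshold; infer_instance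

-- ===== CLAIM (what is proved, stated in full; the proofs are below) =====
def Claim_equal_filter_by_simple_threshold : Prop := ∀ (Imagelist : List Int) (confidence : List Int) (WP_io : List Int) (confid_thres : Int), Dom_filter_by_simple_threshold Imagelist confidence WP_io confid_thres → Pre_filter_by_simple_threshold Imagelist confidence WP_io confid_thres → Spec_filter_by_simple_threshold Imagelist confidence WP_io confid_thres (filter_by_simple_threshold Imagelist confidence WP_io confid_thres)

-- ===== LEMMAS AND PROOFS =====

-- A's loop over range n produces the mapped bit list and the four pair-counts.
lemma loopA (confidence WP_io : List Int) (t : Int) (n : Nat) :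
    (PySem.List.pyRange 0 (n : Int) 1).foldl
      (fun (st : List Int × Int × Int × Int × Int) (j : Int) =>
        let fr := st.1 ++ [if PySem.List.pyGetD confidence j 0 > t then (1 : Int) else 0]
        let w := PySem.List.pyGetD WP_io j 0
        let f := PySem.List.pyGetD fr j 0
        if w = 0 then
          (fr, st.2.1 + (if f = 0 then 1 else 0), st.2.2.1 + (if f = 1 then 1 else 0),
           st.2.2.2.1, st.2.2.2.2)
        else if w = 1 then
          (fr, st.2.1, st.2.2.1, st.2.2.2.1 + (if f = 0 then 1 else 0),
           st.2.2.2.2 + (if f = 1 then 1 else 0))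
        else
          (fr, st.2.1, st.2.2.1, st.2.2.2.1, st.2.2.2.2))
      ([], 0, 0, 0, 0)
    = ((PySem.List.pyRange 0 (n : Int) 1).map (fun j => if PySem.List.pyGetD confidence j 0 > t then (1 : Int) else 0),
       (((PySem.List.pyRange 0 (n : Int) 1).map (fun j => ((PySem.List.pyGetD WP_io j 0, if PySem.List.pyGetD confidence j 0 > t then (1 : Int) else 0) : Int × Int))).count (0, 0) : Int),
       (((PySem.List.pyRange 0 (n : Int) 1).map (fun j => ((PySem.List.pyGetD WP_io j 0, if PySem.List.pyGetD confidence j 0 > t then (1 : Int) else 0) : Int × Int))).count (0, 1) : Int),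
       (((PySem.List.pyRange 0 (n : Int) 1).map (fun j => ((PySem.List.pyGetD WP_io j 0, if PySem.List.pyGetD confidence j 0 > t then (1 : Int) else 0) : Int × Int))).count (1, 0) : Int),
       (((PySem.List.pyRange 0 (n : Int) 1).map (fun j => ((PySem.List.pyGetD WP_io j 0, if PySem.List.pyGetD confidence j 0 > t then (1 : Int) else 0) : Int × Int))).count (1, 1) : Int)) := by
  induction n with
  | zero => simp [PySem.List.pyRange_one_eq_nil]
  | succ m ih =>
    have hsucc : PySem.List.pyRange 0 ((m + 1 : Nat) : Int) 1
        = PySem.List.pyRange 0 (m : Int) 1 ++ [(m : Int)] := by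
      push_cast
      exact PySem.List.pyRange_one_succ_right (by positivity)
    rw [hsucc, List.foldl_append, ih, List.map_append, List.map_append]
    have hlen : ((PySem.List.pyRange 0 (m : Int) 1).map (fun j => if PySem.List.pyGetD confidence j 0 > t then (1 : Int) else 0)).length = m := by
      simp [PySem.List.length_pyRange_one]
    have hget : PySem.List.pyGetD
        ((PySem.List.pyRange 0 (m : Int) 1).map (fun j => if PySem.List.pyGetD confidence j 0 > t then (1 : Int) else 0)
          ++ [if PySem.List.pyGetD confidence (m : Int) 0 > t then (1 : Int) else 0])
        (m : Int) 0 = if PySem.List.pyGetD confidence (m : Int) 0 > t then (1 : Int) else 0 := by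
      rw [PySem.List.pyGetD_natCast, List.getD_eq_getElem?_getD]
      have hc := List.getElem?_concat_length
        (l := (PySem.List.pyRange 0 (m : Int) 1).map (fun j => if PySem.List.pyGetD confidence j 0 > t then (1 : Int) else 0))
        (a := if PySem.List.pyGetD confidence (m : Int) 0 > t then (1 : Int) else 0)
      rw [hlen] at hc
      rw [hc]
      rfl
    simp only [List.foldl_cons, List.foldl_nil, hget]
    simp only [List.map_cons, List.map_nil, List.count_append]
    clear ih hsucc hget hlen
    have hb : (if PySem.List.pyGetD confidence (m : Int) 0 > t then (1 : Int) else 0) = 1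
        ∨ (if PySem.List.pyGetD confidence (m : Int) 0 > t then (1 : Int) else 0) = 0 := by
      split <;> simp
    generalize (if PySem.List.pyGetD confidence (m : Int) 0 > t then (1 : Int) else 0) = b at hb ⊢
    generalize PySem.List.pyGetD WP_io (m : Int) 0 = w
    rcases hb with hb | hb <;> subst hb <;>
      by_cases hw0 : w = 0 <;> by_cases hw1 : w = 1 <;>
      simp [hw0, hw1, Prod.ext_iff]

-- the slice-then-map bit list equals the range-indexed bit list
lemma bits_eq (confidence : List Int) (t : Int) (n : Nat) (h : n ≤ confidence.length) :
    ((PySem.List.slice confidence none (some (n : Int))).map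
        (fun c => if c > t then (1 : Int) else 0))
      = (PySem.List.pyRange 0 (n : Int) 1).map
          (fun j => if PySem.List.pyGetD confidence j 0 > t then (1 : Int) else 0) := by
  rw [PySem.List.slice_to_natCast]
  apply List.ext_getElem
  · simp [PySem.List.length_pyRange_one]; omega
  · intro k h1 h2
    have hk : k < n := by
      simp [List.length_take] at h1; omega
    have hr : (PySem.List.pyRange 0 (n : Int) 1)[k]'(by
        simpa [PySem.List.length_pyRange_one] using hk) = (k : Int) := by
      rw [PySem.List.getElem_pyRange_one]; omega
    simp only [List.getElem_map, hr, List.getElem_take]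
    congr 1
    rw [PySem.List.pyGetD_natCast, List.getD_eq_getElem?_getD,
      List.getElem?_eq_getElem (by omega)]
    rfl

lemma zip_map_range (ws : List Int) (bit : Int → Int) (n : Nat) (h : n ≤ ws.length) :
    ws.zip ((PySem.List.pyRange 0 (n : Int) 1).map bit)
      = (PySem.List.pyRange 0 (n : Int) 1).map
          (fun j => (PySem.List.pyGetD ws j 0, bit j)) := by
  apply List.ext_getElem
  · simp [PySem.List.length_pyRange_one]; omega
  · intro k h1 h2
    have hk : k < n := by simpa [PySem.List.length_pyRange_one] using h2
    have hr : (PySem.List.pyRange 0 (n : Int) 1)[k]'(by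
        simpa [PySem.List.length_pyRange_one] using hk) = (k : Int) := by
      rw [PySem.List.getElem_pyRange_one]; omega
    simp only [List.getElem_zip, List.getElem_map, hr]
    congr 1
    rw [PySem.List.pyGetD_natCast, List.getD_eq_getElem?_getD,
      List.getElem?_eq_getElem (by omega)]
    rfl

-- the sum of second components over the truth-w pairs is the (w,1) count,
-- and class size minus that sum is the (w,0) count (pairs with 0/1 seconds)
lemma sum_filter_eq_count (L : List (Int × Int)) (w : Int)
    (h : ∀ p ∈ L, p.2 = 0 ∨ p.2 = 1) :
    ((L.filter (fun p => p.1 == w)).map (fun p => p.2)).sum = (L.count (w, 1) : Int) := by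
  induction L with
  | nil => simp
  | cons a l ih =>
    obtain ⟨a1, a2⟩ := a
    have ha : a2 = 0 ∨ a2 = 1 := h (a1, a2) (by simp)
    have ihl := ih (fun p hp => h p (List.mem_cons_of_mem _ hp))
    by_cases hw : a1 = w <;> rcases ha with ha | ha <;> subst ha <;>
      simp [List.filter_cons, List.count_cons, hw, ihl, Prod.ext_iff] <;> omega

lemma card_sub_sum_eq_count (L : List (Int × Int)) (w : Int)
    (h : ∀ p ∈ L, p.2 = 0 ∨ p.2 = 1) :
    ((L.filter (fun p => p.1 == w)).map (fun _ => (1 : Int))).sum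
      - ((L.filter (fun p => p.1 == w)).map (fun p => p.2)).sum
      = (L.count (w, 0) : Int) := by
  induction L with
  | nil => simp
  | cons a l ih =>
    obtain ⟨a1, a2⟩ := a
    have ha : a2 = 0 ∨ a2 = 1 := h (a1, a2) (by simp)
    have ihl := ih (fun p hp => h p (List.mem_cons_of_mem _ hp))
    by_cases hw : a1 = w <;> rcases ha with ha | ha <;> subst ha <;>
      simp [List.filter_cons, List.count_cons, hw, Prod.ext_iff] at ihl ⊢ <;> omega

-- ===== VERDICT (by name: the statement is the Claim_ definition above) =====
theorem filter_by_simple_threshold_spec : Claim_equal_filter_by_simple_threshold := by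
  intro Imagelist confidence WP_io t _hdom hpre
  unfold Spec_filter_by_simple_threshold
  unfold filter_by_simple_threshold filter_by_simple_threshold_alt
  rw [PySem.List.enumerate_eq_map_pyRange (d := 0), List.foldl_map]
  simp only [PySem.List.len_eq]
  rw [loopA confidence WP_io t Imagelist.length]
  rw [bits_eq confidence t Imagelist.length hpre.1]
  rw [zip_map_range WP_io _ Imagelist.length hpre.2]
  have hmem : ∀ p ∈ (PySem.List.pyRange 0 (Imagelist.length : Int) 1).map
      (fun j => ((PySem.List.pyGetD WP_io j 0,
        if PySem.List.pyGetD confidence j 0 > t then (1 : Int) else 0) : Int × Int)),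
      p.2 = 0 ∨ p.2 = 1 := by
    intro p hp
    simp only [List.mem_map] at hp
    obtain ⟨j, _, rfl⟩ := hp
    by_cases hc : PySem.List.pyGetD confidence j 0 > t <;> simp [hc]
  rw [card_sub_sum_eq_count _ 0 hmem, card_sub_sum_eq_count _ 1 hmem,
    sum_filter_eq_count _ 0 hmem, sum_filter_eq_count _ 1 hmem]
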